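-- pv_equiv track=rewrite | github.com/techy121592/pydecryptor | py-decryptor/cypherfinder.py | convert_word_to_numbers
-- ===== SOURCE A (Python) =====
-- def convert_word_to_numbers(word):
--     key = {}
--     next_number = 0
--     list_of_numbers = []
--     for letter in list(word):
--         letter = letter.lower()
--         letter_value = key.get(letter, next_number)
--         if letter_value == next_number:
--             next_number = next_number + 1
--             key[letter] = letter_value
--         list_of_numbers.append(letter_value)
--     return list_of_numbers
-- ===== SOURCE B (Python) =====
-- def convert_word_to_numbers(word):
--     letters = [c.lower() for c in word]
--     # value of a letter = number of distinct letters strictly before its first occurrence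
--     return [len(set(letters[:letters.index(c)])) for c in letters]
-- ===== Notes on version B (the rewrite author's own statement) =====
-- stated objective: alternative
-- what changed: B drops A's dict-and-counter machinery entirely: each letter's number is computed as the count of distinct letters in the prefix before that letter's first occurrence (letters.index + set of a slice), trading A's linear single pass for a direct quadratic formula.
import Mathlib
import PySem

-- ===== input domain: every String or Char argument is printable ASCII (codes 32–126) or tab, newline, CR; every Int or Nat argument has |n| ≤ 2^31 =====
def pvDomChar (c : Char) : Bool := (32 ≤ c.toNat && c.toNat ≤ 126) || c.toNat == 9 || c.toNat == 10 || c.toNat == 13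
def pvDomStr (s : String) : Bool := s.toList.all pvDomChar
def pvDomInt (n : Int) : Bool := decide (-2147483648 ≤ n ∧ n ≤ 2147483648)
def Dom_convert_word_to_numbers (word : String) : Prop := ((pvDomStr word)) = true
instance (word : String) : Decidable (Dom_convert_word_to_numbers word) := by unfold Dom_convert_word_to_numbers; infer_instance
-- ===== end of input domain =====

-- B replaces A's dict-and-counter pass by a direct formula: each letter's number is the
-- count of distinct letters before that letter's first occurrence; same values, no table.

-- ===== PORT A =====
-- A's loop state: (key, next_number, list_of_numbers)
def cwtnStepA (st : PySem.Dict Char Int × Int × List Int) (letter : Char) :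
    PySem.Dict Char Int × Int × List Int :=
  let letter := PySem.Chars.lowerChar letter
  let letter_value := st.1.getD letter st.2.1
  if letter_value == st.2.1 then
    (st.1.insert letter letter_value, st.2.1 + 1, st.2.2 ++ [letter_value])
  else
    (st.1, st.2.1, st.2.2 ++ [letter_value])

def convert_word_to_numbers (word : String) : List Int :=
  (word.toList.foldl cwtnStepA (PySem.Dict.empty, 0, [])).2.2

-- ===== PORT B =====
def convert_word_to_numbers_alt (word : String) : List Int :=
  let letters := word.toList.map PySem.Chars.lowerChar
  -- letters.index(c) always succeeds (c is drawn from letters), so the getD default is never used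
  letters.map (fun c =>
    ((PySem.Set.ofList (letters.take ((PySem.List.index? letters c).getD 0))).length : Int))

-- ===== PRECONDITION & SPEC =====
def Spec_convert_word_to_numbers (word : String) (out : List Int) : Prop := out = convert_word_to_numbers_alt word
instance (word : String) (out : List Int) : Decidable (Spec_convert_word_to_numbers word out) := by unfold Spec_convert_word_to_numbers; infer_instance

-- ===== CLAIM (what is proved, stated in full; the proofs are below) =====
def Claim_equal_convert_word_to_numbers : Prop := ∀ (word : String), Dom_convert_word_to_numbers word → Spec_convert_word_to_numbers word (convert_word_to_numbers word)

-- ===== LEMMAS AND PROOFS =====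

-- B's per-letter value: # distinct letters of L before the first occurrence of c in L
def cwtnVal (L : List Char) (c : Char) : Int :=
  ((PySem.Set.ofList (L.take ((PySem.List.index? L c).getD 0))).length : Int)

-- building a set onto s only appends new elements after s
lemma cwtn_update_append (l : List Char) :
    ∀ (s : PySem.Set Char), ∃ t, PySem.Set.update s l = s ++ t := by
  induction l with
  | nil => intro s; exact ⟨[], by simp [PySem.Set.update]⟩
  | cons x xs ih =>
    intro s
    simp only [PySem.Set.update, List.foldl_cons]
    by_cases hx : x ∈ s
    · have hadd : PySem.Set.add s x = s := by simp [PySem.Set.add, hx]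
      rw [hadd]
      exact ih s
    · have hadd : PySem.Set.add s x = s ++ [x] := by simp [PySem.Set.add, hx]
      obtain ⟨t, ht⟩ := ih (s ++ [x])
      refine ⟨x :: t, ?_⟩
      rw [hadd]
      simp only [PySem.Set.update] at ht
      rw [ht]
      simp

lemma cwtn_ofList_append (a b : List Char) :
    PySem.Set.ofList (a ++ b) = PySem.Set.update (PySem.Set.ofList a) b := by
  simp [PySem.Set.ofList_eq_foldl, PySem.Set.update, List.foldl_append]

-- strict growth of the distinct count up to a fresh element
lemma cwtn_distinct_lt (p : List Char) (i : Nat) (c : Char)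
    (hc : c ∈ p) (hnc : c ∉ p.take i) :
    (PySem.Set.ofList (p.take i)).length < (PySem.Set.ofList p).length := by
  have hsplit : p = p.take i ++ p.drop i := (List.take_append_drop i p).symm
  obtain ⟨t, ht⟩ := cwtn_update_append (p.drop i) (PySem.Set.ofList (p.take i))
  have hof : PySem.Set.ofList p = PySem.Set.ofList (p.take i) ++ t := by
    rw [hsplit, cwtn_ofList_append, ht]; rw [← hsplit]
  have hcmem : c ∈ PySem.Set.ofList p := (PySem.Set.mem_ofList p c).mpr hc
  have hcnot : c ∉ PySem.Set.ofList (p.take i) :=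
    fun h => hnc ((PySem.Set.mem_ofList _ c).mp h)
  have htne : t ≠ [] := by
    rintro rfl
    rw [hof, List.append_nil] at hcmem
    exact hcnot hcmem
  rw [hof, List.length_append]
  have : 0 < t.length := List.length_pos_iff.mpr htne
  omega

lemma cwtn_ofList_snoc (p : List Char) (c : Char) (hc : c ∉ p) :
    PySem.Set.ofList (p ++ [c]) = PySem.Set.ofList p ++ [c] := by
  rw [cwtn_ofList_append,
    show PySem.Set.update (PySem.Set.ofList p) [c]
      = PySem.Set.add (PySem.Set.ofList p) c from rfl]
  simp [PySem.Set.add, PySem.Set.mem_ofList, hc]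

-- the loop invariant: A's fold, started from a state describing the processed (lowered)
-- prefix p, appends exactly B's per-letter values of the remaining letters
lemma cwtn_loop (L : List Char) (cs : List Char) :
    ∀ (p : List Char) (d : PySem.Dict Char Int) (acc : List Int),
      L = p ++ cs.map PySem.Chars.lowerChar →
      (∀ c, d.get? c = if c ∈ p then some (cwtnVal L c) else none) →
      (cs.foldl cwtnStepA (d, ((PySem.Set.ofList p).length : Int), acc)).2.2 =
        acc ++ cs.map (fun x => cwtnVal L (PySem.Chars.lowerChar x)) := by
  induction cs with
  | nil => intro p d acc _ _; simp
  | cons x xs ih =>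
    intro p d acc hL hd
    simp only [List.foldl_cons, List.map_cons]
    set ℓ := PySem.Chars.lowerChar x with hℓ
    have hLp : L = p ++ ℓ :: xs.map PySem.Chars.lowerChar := by simpa using hL
    by_cases hmem : ℓ ∈ p
    · -- seen letter: stored value is strictly below the counter, branch not taken
      have hget : d.get? ℓ = some (cwtnVal L ℓ) := by rw [hd]; simp [hmem]
      have hidx : PySem.List.index? L ℓ = PySem.List.index? p ℓ := by
        rw [hLp]
        exact PySem.List.index?_append_of_mem _ hmem
      obtain ⟨i, hi⟩ : ∃ i, PySem.List.index? p ℓ = some i :=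
        Option.isSome_iff_exists.mp ((PySem.List.index?_isSome_iff p ℓ).mpr hmem)
      obtain ⟨hik, hpi, hfirst⟩ := PySem.List.getElem_of_index?_eq_some hi
      have hnotin : ℓ ∉ p.take i := by
        intro hin
        obtain ⟨j, hj, hpj⟩ := List.mem_iff_getElem.mp hin
        have hjlt : j < i := by
          have := hj; simp [List.length_take] at this; omega
        have : p[j] = ℓ := by
          rw [← hpj]; exact (List.getElem_take).symm
        exact hfirst j hjlt this
      have htake : L.take i = p.take i := by
        rw [hLp]
        exact List.take_append_of_le_length (by omega)
      have hvlt : cwtnVal L ℓ < ((PySem.Set.ofList p).length : Int) := by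
        unfold cwtnVal
        rw [hidx, hi, Option.getD_some, htake]
        exact_mod_cast cwtn_distinct_lt p i ℓ hmem hnotin
      have hstep : cwtnStepA (d, ((PySem.Set.ofList p).length : Int), acc) x =
          (d, ((PySem.Set.ofList p).length : Int), acc ++ [cwtnVal L ℓ]) := by
        simp only [cwtnStepA, ← hℓ]
        rw [PySem.Dict.getD_eq_get?_getD, hget, Option.getD_some]
        have : (cwtnVal L ℓ == ((PySem.Set.ofList p).length : Int)) = false := by
          simp; omega
        simp [this]
      rw [hstep]
      have hof : PySem.Set.ofList (p ++ [ℓ]) = PySem.Set.ofList p := by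
        rw [cwtn_ofList_append,
          show PySem.Set.update (PySem.Set.ofList p) [ℓ]
            = PySem.Set.add (PySem.Set.ofList p) ℓ from rfl]
        simp [PySem.Set.add, PySem.Set.mem_ofList, hmem]
      have hrec := ih (p ++ [ℓ]) d (acc ++ [cwtnVal L ℓ])
        (by rw [hLp]; simp) (by
          intro c
          rw [hd]
          by_cases h : c ∈ p
          · simp [h]
          · have hne : c ∉ p ++ [ℓ] := by
              intro hin
              rcases List.mem_append.mp hin with h' | h'
              · exact h h'
              · have : c = ℓ := by simpa using h'
                exact h (this ▸ hmem)
            simp [h, hne])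
      rw [hof] at hrec
      rw [hrec]
      simp
    · -- new letter: default returned, counter appended, letter inserted
      have hget : d.get? ℓ = none := by rw [hd]; simp [hmem]
      have hidx : PySem.List.index? L ℓ = some p.length := by
        rw [hLp]
        have : p ++ ℓ :: xs.map PySem.Chars.lowerChar
            = (p ++ [ℓ]) ++ xs.map PySem.Chars.lowerChar := by simp
        rw [this, PySem.List.index?_append_of_mem _ (by simp)]
        exact PySem.List.index?_append_singleton_self p ℓ hmem
      have hval : cwtnVal L ℓ = ((PySem.Set.ofList p).length : Int) := by
        unfold cwtnVal
        rw [hidx, Option.getD_some, hLp, List.take_append_of_le_length (le_refl _),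
          List.take_length]
      have hstep : cwtnStepA (d, ((PySem.Set.ofList p).length : Int), acc) x =
          (d.insert ℓ ((PySem.Set.ofList p).length : Int),
           ((PySem.Set.ofList p).length : Int) + 1,
           acc ++ [((PySem.Set.ofList p).length : Int)]) := by
        simp only [cwtnStepA, ← hℓ]
        rw [PySem.Dict.getD_eq_get?_getD, hget, Option.getD_none]
        simp
      rw [hstep]
      have hof : ((PySem.Set.ofList (p ++ [ℓ])).length : Int)
          = ((PySem.Set.ofList p).length : Int) + 1 := by
        rw [cwtn_ofList_snoc p ℓ hmem]; simp
      have hrec := ih (p ++ [ℓ])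
        (d.insert ℓ ((PySem.Set.ofList p).length : Int))
        (acc ++ [((PySem.Set.ofList p).length : Int)])
        (by rw [hLp]; simp)
        (by
          intro c
          by_cases hcℓ : c = ℓ
          · subst hcℓ
            rw [PySem.Dict.get?_insert_self, hval]
            simp
          · rw [PySem.Dict.get?_insert_of_ne _ _ hcℓ, hd]
            by_cases h : c ∈ p <;> simp [h, hcℓ])
      rw [hof] at hrec
      rw [hrec, hval]
      simp

-- ===== VERDICT (by name: the statement is the Claim_ definition above) =====
theorem convert_word_to_numbers_spec : Claim_equal_convert_word_to_numbers := by
  intro word _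
  unfold Spec_convert_word_to_numbers convert_word_to_numbers convert_word_to_numbers_alt
  have h := cwtn_loop (word.toList.map PySem.Chars.lowerChar) word.toList []
    PySem.Dict.empty []
    (by simp)
    (by intro c; simp [PySem.Dict.empty, PySem.Dict.get?])
  simp only [List.nil_append] at h
  have h0 : (((PySem.Set.ofList ([] : List Char)).length : Nat) : Int) = 0 := rfl
  rw [h0] at h
  rw [h, List.map_map]
  rfl
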